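-- pv_equiv track=rewrite | github.com/miliar/Code_Jam_Webscraper | solutions_python/Problem_201/2482.py | finding_max_space
-- ===== SOURCE A (Python) =====
-- def finding_max_space(a):
--     '''
--     Finding maximum space where the next prson will occupy
--     '''
--     l=len(a)
--     i_start=0
--     i_end=l-1
--     i=0
--     maximum=0
--     while(i<l):
--         i_temp_start=i
--         temp=0
--         while(i<=l-1 and a[i]!="o"):
--             temp+=1
--             i+=1
--         if(temp>maximum):
--             maximum=temp
--             i_start=i_temp_start
--             i_end=i-1
--         i+=1
--     return i_start, i_end
-- ===== SOURCE B (Python) =====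
-- def finding_max_space(a):
--     '''
--     Finding maximum space where the next prson will occupy
--     '''
--     segs = []
--     cur = 0
--     for x in a:
--         if x == "o":
--             segs.append(cur)
--             cur = 0
--         else:
--             cur += 1
--     segs.append(cur)
--     maximum = 0
--     i_start = 0
--     i_end = len(a) - 1
--     pos = 0
--     for length in segs:
--         if length > maximum:
--             maximum = length
--             i_start = pos
--             i_end = pos + length - 1
--         pos += length + 1
--     return i_start, i_end
-- ===== Notes on version B (the rewrite author's own statement) =====
-- stated objective: simpler
-- what changed: Replaces A's nested while loops with per-index cursor arithmetic by a split-into-run-lengths pass followed by a flat scan over the segment lengths with a running offset.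
import Mathlib
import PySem

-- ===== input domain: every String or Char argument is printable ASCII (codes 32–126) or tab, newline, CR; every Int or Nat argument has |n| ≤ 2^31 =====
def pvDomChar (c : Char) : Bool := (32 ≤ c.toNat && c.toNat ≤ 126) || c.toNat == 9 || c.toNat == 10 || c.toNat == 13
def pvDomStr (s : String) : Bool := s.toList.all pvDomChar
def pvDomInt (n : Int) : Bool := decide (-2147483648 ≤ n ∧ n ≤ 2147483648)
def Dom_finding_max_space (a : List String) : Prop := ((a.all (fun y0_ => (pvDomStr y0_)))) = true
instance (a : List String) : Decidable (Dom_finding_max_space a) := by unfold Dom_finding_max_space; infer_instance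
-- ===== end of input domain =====

-- B replaces A's nested while loops by a split-into-run-lengths pass plus a flat scan (simpler); return values proved identical on all inputs.

-- ===== PORT A =====
-- inner while loop: while i <= l-1 and a[i] != "o": temp += 1; i += 1  — returns (temp, i).
-- a[i] via PySem.List.pyGet?; the 'none' case (IndexError) is unreachable since 0 ≤ i here,
-- and the guard i ≤ l-1 already stops the loop at the right bound; 'none' stops the loop.
-- 'fuel' only makes the recursion structural; with the fuel supplied below the base case is never reached.
def finding_max_space_inner (a : List String) (l : Int) : Nat → Int → Int → Int × Int
  | 0, i, temp => (temp, i)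
  | fuel + 1, i, temp =>
    if (i ≤ l - 1 ∧ ((PySem.List.pyGet? a i).getD "o") ≠ "o") then
      finding_max_space_inner a l fuel (i + 1) (temp + 1)
    else
      (temp, i)

-- outer while loop: while i < l  (same fuel discipline)
def finding_max_space_outer (a : List String) (l : Int) : Nat → Int → Int → Int → Int → Int × Int
  | 0, _, i_start, i_end, _ => (i_start, i_end)
  | fuel + 1, i, i_start, i_end, maximum =>
    if i < l then
      let i_temp_start := i
      let r := finding_max_space_inner a l (a.length + 1) i 0
      if r.1 > maximum then
        finding_max_space_outer a l fuel (r.2 + 1) i_temp_start (r.2 - 1) r.1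
      else
        finding_max_space_outer a l fuel (r.2 + 1) i_start i_end maximum
    else
      (i_start, i_end)

def finding_max_space (a : List String) : Int × Int :=
  finding_max_space_outer a (a.length : Int) (a.length + 1) 0 0 ((a.length : Int) - 1) 0

-- ===== PORT B =====
-- first for loop of Source B: build the list of run lengths (split on "o")
def fmsAltBuild (xs : List String) (segs : List Int) (cur : Int) : List Int :=
  match xs with
  | [] => segs ++ [cur]
  | x :: rest => if x == "o" then fmsAltBuild rest (segs ++ [cur]) 0 else fmsAltBuild rest segs (cur + 1)

-- second for loop of Source B: scan the lengths with a running offset pos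
def fmsAltScan (segs : List Int) (maximum i_start i_end pos : Int) : Int × Int :=
  match segs with
  | [] => (i_start, i_end)
  | len :: rest =>
    if len > maximum then fmsAltScan rest len pos (pos + len - 1) (pos + len + 1)
    else fmsAltScan rest maximum i_start i_end (pos + len + 1)

def finding_max_space_alt (a : List String) : Int × Int :=
  fmsAltScan (fmsAltBuild a [] 0) 0 0 ((a.length : Int) - 1) 0

-- ===== PRECONDITION & SPEC =====
def Spec_finding_max_space (a : List String) (out : Int × Int) : Prop := out = finding_max_space_alt a
instance (a : List String) (out : Int × Int) : Decidable (Spec_finding_max_space a out) := by unfold Spec_finding_max_space; infer_instance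

-- ===== CLAIM (what is proved, stated in full; the proofs are below) =====
def Claim_equal_finding_max_space : Prop := ∀ (a : List String), Dom_finding_max_space a → Spec_finding_max_space a (finding_max_space a)

-- ===== LEMMAS AND PROOFS =====

-- length of the leading run of non-"o" elements
def fmsRun (xs : List String) : Nat := (xs.takeWhile (· ≠ "o")).length

-- canonical list of run lengths, split on "o"
def fmsSegs (xs : List String) : List Int :=
  if h : fmsRun xs < xs.length then
    (fmsRun xs : Int) :: fmsSegs (xs.drop (fmsRun xs + 1))
  else
    [(fmsRun xs : Int)]
termination_by xs.length
decreasing_by simp; omega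

def fmsAddFirst (c : Int) : List Int → List Int
  | [] => []
  | h :: t => (c + h) :: t

theorem fmsRun_cons_o (rest : List String) : fmsRun ("o" :: rest) = 0 := by
  simp [fmsRun, List.takeWhile]

theorem fmsRun_cons_ne (x : String) (rest : List String) (hx : x ≠ "o") :
    fmsRun (x :: rest) = fmsRun rest + 1 := by
  simp [fmsRun, List.takeWhile, hx]

theorem fmsSegs_nil : fmsSegs ([] : List String) = [0] := by
  rw [fmsSegs]
  simp [fmsRun]

theorem fmsSegs_cons_o (rest : List String) : fmsSegs ("o" :: rest) = 0 :: fmsSegs rest := by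
  rw [fmsSegs]
  simp only [fmsRun_cons_o]
  rw [dif_pos (by simp)]
  simp

theorem fmsSegs_cons_ne (x : String) (rest : List String) (hx : x ≠ "o") :
    fmsSegs (x :: rest) = fmsAddFirst 1 (fmsSegs rest) := by
  conv_lhs => rw [fmsSegs]
  conv_rhs => rw [fmsSegs]
  simp only [fmsRun_cons_ne x rest hx, List.length_cons]
  by_cases hlt : fmsRun rest < rest.length
  · rw [dif_pos (by omega), dif_pos hlt]
    simp only [List.drop_succ_cons, fmsAddFirst, List.cons.injEq]
    exact ⟨by push_cast; ring, trivial⟩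
  · rw [dif_neg (by omega), dif_neg hlt]
    simp only [fmsAddFirst, List.cons.injEq, and_true]
    push_cast; ring

theorem fmsAddFirst_zero (s : List Int) : fmsAddFirst 0 s = s := by
  cases s <;> simp [fmsAddFirst]

theorem fmsAddFirst_comp (c d : Int) (s : List Int) :
    fmsAddFirst c (fmsAddFirst d s) = fmsAddFirst (c + d) s := by
  cases s with
  | nil => rfl
  | cons h t => simp [fmsAddFirst]; ring

theorem fmsBuild_eq (xs : List String) (segs : List Int) (cur : Int) :
    fmsAltBuild xs segs cur = segs ++ fmsAddFirst cur (fmsSegs xs) := by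
  induction xs generalizing segs cur with
  | nil => simp [fmsAltBuild, fmsSegs_nil, fmsAddFirst]
  | cons x rest ih =>
    by_cases hx : x = "o"
    · subst hx
      rw [fmsAltBuild]
      simp only [beq_self_eq_true, if_true]
      rw [ih, fmsAddFirst_zero, fmsSegs_cons_o]
      show segs ++ [cur] ++ fmsSegs rest = segs ++ fmsAddFirst cur (0 :: fmsSegs rest)
      simp [fmsAddFirst]
    · rw [fmsAltBuild]
      simp only [beq_iff_eq, hx, if_false, ih, fmsSegs_cons_ne x rest hx, fmsAddFirst_comp]

-- the inner while loop counts the leading run of non-"o" elements from position n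
theorem fmsInner_eq (a : List String) : ∀ (F : Nat) (n : Nat) (temp : Int), n ≤ a.length → a.length - n < F →
    finding_max_space_inner a a.length F (n : Int) temp
      = (temp + (fmsRun (a.drop n) : Int), (n : Int) + (fmsRun (a.drop n) : Int)) := by
  intro F
  induction F with
  | zero => intro n temp hn hF; omega
  | succ F ih =>
    intro n temp hn hF
    simp only [finding_max_space_inner]
    by_cases hend : n = a.length
    · rw [if_neg (by intro ⟨h1, _⟩; omega :
        ¬ ((n : Int) ≤ (a.length : Int) - 1 ∧ ((PySem.List.pyGet? a n).getD "o") ≠ "o"))]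
      simp [hend, fmsRun]
    · have hlt : n < a.length := by omega
      have hget : PySem.List.pyGet? a (n : Int) = some (a.get ⟨n, hlt⟩) := by
        rw [PySem.List.pyGet?_natCast]; simp
      have hdrop : a.drop n = a.get ⟨n, hlt⟩ :: a.drop (n + 1) := List.drop_eq_getElem_cons hlt
      by_cases hx : a.get ⟨n, hlt⟩ = "o"
      · rw [if_neg (by rw [hget]; intro ⟨_, h2⟩; exact h2 hx :
          ¬ ((n : Int) ≤ (a.length : Int) - 1 ∧ ((PySem.List.pyGet? a n).getD "o") ≠ "o"))]
        rw [hdrop, hx, fmsRun_cons_o]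
        simp
      · rw [if_pos (by rw [hget]; exact ⟨by omega, by simpa using hx⟩ :
          ((n : Int) ≤ (a.length : Int) - 1 ∧ ((PySem.List.pyGet? a n).getD "o") ≠ "o"))]
        have hcast : (n : Int) + 1 = ((n + 1 : Nat) : Int) := by push_cast; ring
        rw [hcast, ih (n + 1) (temp + 1) (by omega) (by omega)]
        rw [hdrop, fmsRun_cons_ne _ _ hx, Prod.mk.injEq]
        exact ⟨by push_cast; ring, by push_cast; ring⟩

theorem fmsRun_le (xs : List String) : fmsRun xs ≤ xs.length :=
  (List.takeWhile_sublist _).length_le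

-- the outer while loop, once past the end of the list, returns its state (with any fuel)
theorem fmsOuter_base (a : List String) (F : Nat) (i : Int) (m s e : Int)
    (hi : (a.length : Int) ≤ i) :
    finding_max_space_outer a a.length F i s e m = (s, e) := by
  cases F with
  | zero => rfl
  | succ F =>
    simp only [finding_max_space_outer]
    rw [if_neg (by omega)]

-- the outer while loop from position n equals B's scan over the run lengths of the suffix
theorem fmsOuter_eq (a : List String) : ∀ (F : Nat) (n : Nat) (m s e : Int), 0 ≤ m → a.length - n < F →
    finding_max_space_outer a a.length F (n : Int) s e m
      = fmsAltScan (fmsSegs (a.drop n)) m s e (n : Int) := by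
  intro F
  induction F with
  | zero => intro n m s e hm hF; omega
  | succ F ih =>
    intro n m s e hm hF
    by_cases hlt : n < a.length
    · simp only [finding_max_space_outer]
      rw [if_pos (by omega : ((n : Int) < (a.length : Int)))]
      simp only [fmsInner_eq a (a.length + 1) n 0 hlt.le (by omega), zero_add]
      rw [fmsSegs]
      generalize ht : fmsRun (a.drop n) = t
      have htlen : t ≤ a.length - n := by
        have h2 := fmsRun_le (a.drop n)
        simp only [List.length_drop] at h2; omega
      by_cases hc : t < (a.drop n).length
      · rw [dif_pos hc]
        have hc' : t < a.length - n := by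
          have h2 := hc; simp only [List.length_drop] at h2; exact h2
        have hdd : (a.drop n).drop (t + 1) = a.drop (n + (t + 1)) := by
          rw [List.drop_drop]
        rw [hdd]
        simp only [fmsAltScan]
        by_cases hgt : (t : Int) > m
        · rw [if_pos hgt, if_pos hgt]
          have hrec := ih (n + (t + 1)) (t : Int) (n : Int) ((n : Int) + t - 1) (by positivity) (by omega)
          push_cast at hrec ⊢
          convert hrec using 2
        · rw [if_neg hgt, if_neg hgt]
          have hrec := ih (n + (t + 1)) m s e hm (by omega)
          push_cast at hrec ⊢
          convert hrec using 2
      · rw [dif_neg hc]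
        have ht2 : t = a.length - n := by
          simp only [List.length_drop] at hc; omega
        simp only [fmsAltScan]
        by_cases hgt : (t : Int) > m
        · rw [if_pos hgt, if_pos hgt]
          rw [fmsOuter_base a F _ _ _ _ (by omega)]
        · rw [if_neg hgt, if_neg hgt]
          rw [fmsOuter_base a F _ _ _ _ (by omega)]
    · rw [fmsOuter_base a (F + 1) _ _ _ _ (by omega)]
      rw [List.drop_eq_nil_of_le (by omega), fmsSegs_nil]
      simp only [fmsAltScan]
      rw [if_neg (by omega)]

-- ===== VERDICT (by name: the statement is the Claim_ definition above) =====
theorem finding_max_space_spec : Claim_equal_finding_max_space := by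
  intro a _
  unfold Spec_finding_max_space finding_max_space finding_max_space_alt
  rw [fmsBuild_eq, fmsAddFirst_zero]
  have := fmsOuter_eq a (a.length + 1) 0 0 0 ((a.length : Int) - 1) le_rfl (by omega)
  simpa using this
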